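-- pv_equiv track=rewrite | github.com/aysieelf/Alpha63 | Week-1/2-Multidimensional_lists/big_numbers.py | ttl_number
-- ===== SOURCE A (Python) =====
-- def ttl_number(n1: list):
--     """
--     Summarises numbers in each nested lists, by adding tens to the next one.
--
--     Parameters:
--         n1 (list): A 2d list, each nested list contains one-digit numbers.
--     """
--     tens = 0
--     for row in range(len(n1)):
--         new_row = sum(n1[row]) + tens
--         if new_row >= 10:
--             tens = 1
--             new_row -= 10
--         else:
--             tens = 0
--         n1[row] = new_row
--     if tens == 1:
--         n1.append(1)
--     return n1
-- ===== SOURCE B (Python) =====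
-- def ttl_number(n1: list):
--     # Recursive carry propagation building the result front-to-back;
--     # the original list is then updated in place to keep A's mutation.
--     def go(rows, carry):
--         if not rows:
--             return [1] if carry else []
--         s = sum(rows[0]) + carry
--         if s >= 10:
--             return [s - 10] + go(rows[1:], 1)
--         return [s] + go(rows[1:], 0)
--     res = go(n1, 0)
--     n1[:] = res
--     return n1
-- ===== Notes on version B (the rewrite author's own statement) =====
-- stated objective: alternative
-- what changed: Replaces A's index loop that rewrites n1[row] under a tens flag (plus a final append) with a structural recursion on the rows threading the carry and building the result list directly, with the trailing [1] produced by the base case.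
import Mathlib
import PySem

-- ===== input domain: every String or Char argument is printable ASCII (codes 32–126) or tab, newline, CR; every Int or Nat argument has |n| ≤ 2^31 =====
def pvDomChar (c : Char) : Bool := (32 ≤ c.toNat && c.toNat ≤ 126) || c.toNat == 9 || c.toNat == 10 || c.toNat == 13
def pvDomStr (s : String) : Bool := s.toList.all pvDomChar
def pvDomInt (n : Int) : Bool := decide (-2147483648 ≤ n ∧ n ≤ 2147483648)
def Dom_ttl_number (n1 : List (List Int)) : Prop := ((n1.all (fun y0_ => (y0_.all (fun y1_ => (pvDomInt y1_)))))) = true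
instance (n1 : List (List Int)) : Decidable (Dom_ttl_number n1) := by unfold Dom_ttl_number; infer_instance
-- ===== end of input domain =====

-- B replaces A's index loop + tens flag by a structural recursion on the rows threading the carry
-- (alternative decomposition, same cost). Both mutate the argument in Python; equivalence here is about the return value.

-- ===== PORT A =====
-- A's for-loop over range(len(n1)) rewriting n1[row], transcribed as a left fold
-- carrying the already-rewritten prefix and the tens flag.
def ttl_number (n1 : List (List Int)) : List Int :=
  let st := n1.foldl (fun (p : List Int × Int) row =>
      let new_row := row.foldl (· + ·) 0 + p.2
      if new_row ≥ 10 then (p.1 ++ [new_row - 10], 1) else (p.1 ++ [new_row], 0))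
    ([], 0)
  if st.2 = 1 then st.1 ++ [1] else st.1

-- ===== PORT B =====
def ttl_number_go : List (List Int) → Int → List Int
  | [], carry => if carry ≠ 0 then [1] else []
  | r :: rs, carry =>
    let s := r.foldl (· + ·) 0 + carry
    if s ≥ 10 then (s - 10) :: ttl_number_go rs 1 else s :: ttl_number_go rs 0

def ttl_number_alt (n1 : List (List Int)) : List Int := ttl_number_go n1 0

-- ===== PRECONDITION & SPEC =====
def Spec_ttl_number (n1 : List (List Int)) (out : List Int) : Prop := out = ttl_number_alt n1
instance (n1 : List (List Int)) (out : List Int) : Decidable (Spec_ttl_number n1 out) := by unfold Spec_ttl_number; infer_instance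

-- ===== CLAIM (what is proved, stated in full; the proofs are below) =====
def Claim_equal_ttl_number : Prop := ∀ (n1 : List (List Int)), Dom_ttl_number n1 → Spec_ttl_number n1 (ttl_number n1)

-- ===== LEMMAS AND PROOFS =====
lemma ttl_key : ∀ (rs : List (List Int)) (acc : List Int) (t : Int), t = 0 ∨ t = 1 →
    (let st := rs.foldl (fun (p : List Int × Int) row =>
        let new_row := row.foldl (· + ·) 0 + p.2
        if new_row ≥ 10 then (p.1 ++ [new_row - 10], 1) else (p.1 ++ [new_row], 0))
      (acc, t)
     if st.2 = 1 then st.1 ++ [1] else st.1) = acc ++ ttl_number_go rs t := by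
  intro rs
  induction rs with
  | nil =>
    intro acc t ht
    rcases ht with h | h <;> subst h <;> simp [ttl_number_go]
  | cons r rs ih =>
    intro acc t ht
    simp only [List.foldl_cons, ttl_number_go]
    by_cases h : r.foldl (· + ·) 0 + t ≥ 10
    · simp only [if_pos h]
      simpa using ih (acc ++ [r.foldl (· + ·) 0 + t - 10]) 1 (Or.inr rfl)
    · simp only [if_neg h]
      simpa using ih (acc ++ [r.foldl (· + ·) 0 + t]) 0 (Or.inl rfl)

-- ===== VERDICT (by name: the statement is the Claim_ definition above) =====
theorem ttl_number_spec : Claim_equal_ttl_number := by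
  intro n1 _
  unfold Spec_ttl_number ttl_number ttl_number_alt
  simpa using ttl_key n1 [] 0 (Or.inl rfl)
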